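-- pv_equiv track=rewrite | github.com/louis-cl/advent-of-code | 2025/day2/part2.py | isInvalidPeriod
-- ===== SOURCE A (Python) =====
-- def isInvalidPeriod(s, period):
--     n = len(s)
--     if n % period != 0: return False
--     bit = s[:period]
--     start = period
--     while start+period <= n:
--         if s[start:start+period] != bit:
--             return False
--         start += period
--     return True
-- ===== SOURCE B (Python) =====
-- def isInvalidPeriod(s, period):
--     if len(s) % period != 0:
--         return False
--     return s == s[:period] * (len(s) // period)
-- ===== Notes on version B (the rewrite author's own statement) =====
-- stated objective: idiomatic
-- what changed: The block-by-block while loop with early exit is replaced by one closed-form repetition check: build the candidate string s[:period]*(len(s)//period) once and compare it to s with a single equality.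
import Mathlib
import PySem

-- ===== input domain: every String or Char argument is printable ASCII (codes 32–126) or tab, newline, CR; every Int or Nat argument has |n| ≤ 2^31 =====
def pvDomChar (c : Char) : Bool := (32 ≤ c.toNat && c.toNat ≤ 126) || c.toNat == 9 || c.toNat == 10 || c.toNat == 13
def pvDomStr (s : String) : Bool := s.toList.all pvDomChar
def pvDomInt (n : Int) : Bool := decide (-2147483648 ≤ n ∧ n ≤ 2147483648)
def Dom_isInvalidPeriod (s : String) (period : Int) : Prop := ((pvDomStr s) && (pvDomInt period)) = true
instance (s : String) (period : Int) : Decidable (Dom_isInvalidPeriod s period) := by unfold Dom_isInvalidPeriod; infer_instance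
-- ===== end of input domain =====

-- B replaces A's block-by-block while loop by a single closed-form comparison with the
-- repeated prefix (idiomatic; same asymptotic cost).

-- ===== PORT A =====
-- the while loop of A, as fuel recursion (fuel only makes it total; inside Pre_ it never runs out)
def isInvalidPeriodLoop (s : String) (bit : String) (period n : Int) : Int → Nat → Bool
  | _, 0 => true
  | start, fuel + 1 =>
    if start + period ≤ n then
      if (PySem.Str.slice s (some start) (some (start + period))) ≠ bit then false
      else isInvalidPeriodLoop s bit period n (start + period) fuel
    else true

def isInvalidPeriod (s : String) (period : Int) : Bool :=
  let n : Int := PySem.Str.len s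
  if PySem.Int.mod n period ≠ 0 then false
  else
    let bit := PySem.Str.slice s none (some period)
    isInvalidPeriodLoop s bit period n period (s.toList.length + 1)

-- ===== PORT B =====
-- s[:period] * (len(s) // period): Python str*int, negative count gives ''; exact via List.pyRepeat
def isInvalidPeriod_alt (s : String) (period : Int) : Bool :=
  let n : Int := PySem.Str.len s
  if PySem.Int.mod n period ≠ 0 then false
  else
    s == String.ofList (PySem.List.pyRepeat (PySem.Str.slice s none (some period)).toList
                          (PySem.Int.floordiv n period))

-- ===== PRECONDITION & SPEC =====
-- Pre_ excludes period = 0, where A raises ZeroDivisionError (B raises it too), and the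
-- negative periods (empty s, or period = -len(s)) on which A's while loop never terminates.
def Pre_isInvalidPeriod (s : String) (period : Int) : Prop :=
  0 < period ∨ (period < 0 ∧ s.toList ≠ [] ∧ period ≠ -(s.toList.length : Int))
instance (s : String) (period : Int) : Decidable (Pre_isInvalidPeriod s period) := by
  unfold Pre_isInvalidPeriod; infer_instance

def pvWitness_isInvalidPeriod : String × Int := ("abab", 2)

def Spec_isInvalidPeriod (s : String) (period : Int) (out : Bool) : Prop := out = isInvalidPeriod_alt s period
instance (s : String) (period : Int) (out : Bool) : Decidable (Spec_isInvalidPeriod s period out) := by unfold Spec_isInvalidPeriod; infer_instance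

-- ===== CLAIM (what is proved, stated in full; the proofs are below) =====
def Claim_equal_isInvalidPeriod : Prop := ∀ (s : String) (period : Int), Dom_isInvalidPeriod s period → Pre_isInvalidPeriod s period → Spec_isInvalidPeriod s period (isInvalidPeriod s period)


-- ===== LEMMAS AND PROOFS =====

-- proof-side list view of A's while loop (helpers used only by the proofs)
def listLoop (b : List Char) (p : Nat) (t : List Char) : Bool :=
  if _h : p ≤ t.length ∧ 0 < p then
    if t.take p = b then listLoop b p (t.drop p) else false
  else true
termination_by t.length
decreasing_by simp only [List.length_drop]; omega

theorem listLoop_eq (b : List Char) (p : Nat) (hp : 0 < p) (hb : b.length = p) :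
    ∀ (n : Nat) (t : List Char), t.length ≤ n → p ∣ t.length →
      listLoop b p t = decide (t = (List.replicate (t.length / p) b).flatten) := by
  intro n
  induction n with
  | zero =>
    intro t ht _
    have ht0 : t = [] := List.eq_nil_of_length_eq_zero (by omega)
    subst ht0
    rw [listLoop, dif_neg (by simp only [List.length_nil]; omega)]
    simp
  | succ n ih =>
    intro t ht hd
    rw [listLoop]
    by_cases hle : p ≤ t.length
    · rw [dif_pos ⟨hle, hp⟩]
      obtain ⟨m, hm⟩ := hd
      obtain ⟨m', rfl⟩ : ∃ m', m = m' + 1 := by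
        refine ⟨m - 1, ?_⟩
        rcases Nat.eq_zero_or_pos m with h0 | h0
        · subst h0; simp only [Nat.mul_zero] at hm; omega
        · omega
      have hdivm : t.length / p = m' + 1 := by rw [hm, Nat.mul_div_cancel_left _ hp]
      have hdrop_len : (t.drop p).length = p * m' := by
        simp only [List.length_drop, hm, Nat.mul_succ]; omega
      have hflat : (List.replicate (t.length / p) b).flatten
          = b ++ (List.replicate m' b).flatten := by
        rw [hdivm, List.replicate_succ, List.flatten_cons]
      by_cases htake : t.take p = b
      · rw [if_pos htake]
        rw [ih (t.drop p) (by simp only [List.length_drop]; omega) ⟨m', hdrop_len⟩]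
        rw [hdrop_len, Nat.mul_div_cancel_left _ hp, hflat]
        have hiff : (t.drop p = (List.replicate m' b).flatten)
            ↔ (t = b ++ (List.replicate m' b).flatten) := by
          constructor
          · intro h
            conv_lhs => rw [← List.take_append_drop p t]
            rw [htake, h]
          · intro h
            rw [h, List.drop_left' hb]
        simp [hiff]
      · rw [if_neg htake]
        symm
        rw [decide_eq_false_iff_not]
        intro hcontra
        apply htake
        rw [hcontra, hflat, List.take_append_of_le_length (by omega), ← hb, List.take_length]
    · have h0 : t.length = 0 := Nat.eq_zero_of_dvd_of_lt hd (by omega)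
      have ht0 : t = [] := List.eq_nil_of_length_eq_zero h0
      subst ht0
      rw [dif_neg (by simp only [List.length_nil]; omega)]
      simp

theorem loop_bridge (s bit : String) (p : Nat) (hp : 0 < p) :
    ∀ (fuel j : Nat), s.toList.length < j + fuel * p →
      isInvalidPeriodLoop s bit (p : Int) ((s.toList.length : Nat) : Int) ((j : Nat) : Int) fuel
        = listLoop bit.toList p (s.toList.drop j) := by
  intro fuel
  induction fuel with
  | zero =>
    intro j h
    have hnil : s.toList.drop j = [] := List.drop_eq_nil_of_le (by omega)
    rw [isInvalidPeriodLoop, hnil, listLoop, dif_neg (by simp only [List.length_nil]; omega)]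
  | succ fuel ih =>
    intro j h
    have hexp : (fuel + 1) * p = fuel * p + p := by ring
    rw [isInvalidPeriodLoop]
    by_cases hc : (j : Int) + (p : Int) ≤ ((s.toList.length : Nat) : Int)
    · have hjp : j + p ≤ s.toList.length := by exact_mod_cast hc
      have hslice : (PySem.Str.slice s (some (j : Int)) (some ((j : Int) + (p : Int)))).toList
          = (s.toList.drop j).take p := by
        simp [PySem.List.slice_natCast_add]
      rw [if_pos hc]
      have hlen : p ≤ (s.toList.drop j).length := by simp only [List.length_drop]; omega
      by_cases heq : (s.toList.drop j).take p = bit.toList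
      · have hs : PySem.Str.slice s (some (j : Int)) (some ((j : Int) + (p : Int))) = bit :=
          String.toList_inj.mp (by rw [hslice, heq])
        rw [if_neg (by simp [hs])]
        have hcast : (j : Int) + (p : Int) = (((j + p : Nat) : Nat) : Int) := by push_cast; ring
        rw [hcast, ih (j + p) (by omega)]
        conv_rhs => rw [listLoop]
        rw [dif_pos ⟨hlen, hp⟩, if_pos heq, List.drop_drop]
      · have hs : PySem.Str.slice s (some (j : Int)) (some ((j : Int) + (p : Int))) ≠ bit := by
          intro hcon
          exact heq (by rw [← hslice, hcon])
        rw [if_pos (by simp [hs])]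
        rw [listLoop, dif_pos ⟨hlen, hp⟩, if_neg heq]
    · rw [if_neg hc]
      have hlt : s.toList.length < j + p := by
        by_contra hcon
        exact hc (by exact_mod_cast by omega)
      rw [listLoop, dif_neg (by simp only [List.length_drop]; omega)]

-- positive-period equivalence, on lists
theorem main_pos (s : String) (p : Nat) (hp : 0 < p) (hd : p ∣ s.toList.length) :
    isInvalidPeriodLoop s (PySem.Str.slice s none (some (p : Int))) (p : Int)
        ((s.toList.length : Nat) : Int) (p : Int) (s.toList.length + 1)
      = (s == String.ofList (PySem.List.pyRepeat
          (PySem.Str.slice s none (some (p : Int))).toList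
          (PySem.Int.floordiv ((s.toList.length : Nat) : Int) (p : Int)))) := by
  have hbitL : (PySem.Str.slice s none (some (p : Int))).toList = s.toList.take p := by
    simp [PySem.List.slice_to_natCast]
  have hfuel : s.toList.length < p + (s.toList.length + 1) * p := by
    have h1 : s.toList.length + 1 ≤ (s.toList.length + 1) * p :=
      Nat.le_mul_of_pos_right _ hp
    omega
  have hbridge := loop_bridge s (PySem.Str.slice s none (some (p : Int))) p hp
      (s.toList.length + 1) p hfuel
  rw [hbridge]
  have hRHS : (s == String.ofList (PySem.List.pyRepeat
          (PySem.Str.slice s none (some (p : Int))).toList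
          (PySem.Int.floordiv ((s.toList.length : Nat) : Int) (p : Int))))
      = decide (s.toList = (List.replicate (s.toList.length / p) (s.toList.take p)).flatten) := by
    rw [Bool.beq_eq_decide_eq]
    apply decide_eq_decide.mpr
    rw [← String.toList_inj, String.toList_ofList, hbitL]
    have hfdiv : PySem.Int.floordiv ((s.toList.length : Nat) : Int) ((p : Nat) : Int)
        = ((s.toList.length / p : Nat) : Int) := PySem.Int.floordiv_natCast _ _
    rw [hfdiv]
    simp only [PySem.List.pyRepeat, Int.toNat_natCast]
  rw [hRHS, hbitL]
  rcases Nat.eq_zero_or_pos s.toList.length with h0 | h0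
  · have hnil : s.toList = [] := List.eq_nil_of_length_eq_zero h0
    rw [List.drop_eq_nil_of_le (by omega), listLoop,
      dif_neg (by simp only [List.length_nil]; omega)]
    rw [hnil]
    simp
  · have hpn : p ≤ s.toList.length := Nat.le_of_dvd h0 hd
    have hblen : (s.toList.take p).length = p := by
      simp only [List.length_take]; omega
    obtain ⟨m, hm⟩ := hd
    obtain ⟨m', rfl⟩ : ∃ m', m = m' + 1 := by
      refine ⟨m - 1, ?_⟩
      rcases Nat.eq_zero_or_pos m with hz | hz
      · subst hz; simp only [Nat.mul_zero] at hm; omega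
      · omega
    have hdroplen : (s.toList.drop p).length = p * m' := by
      simp only [List.length_drop, hm, Nat.mul_succ]; omega
    rw [listLoop_eq _ p hp hblen (s.toList.length) (s.toList.drop p)
      (by simp only [List.length_drop]; omega) ⟨m', hdroplen⟩]
    rw [hdroplen, Nat.mul_div_cancel_left _ hp,
      show s.toList.length / p = m' + 1 by rw [hm, Nat.mul_div_cancel_left _ hp]]
    apply decide_eq_decide.mpr
    rw [List.replicate_succ, List.flatten_cons]
    constructor
    · intro h
      conv_lhs => rw [← List.take_append_drop p s.toList]
      rw [h]
    · intro h
      conv_lhs => rw [h]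
      exact List.drop_left' hblen

-- ===== VERDICT (by name: the statement is the Claim_ definition above) =====
theorem isInvalidPeriod_spec : Claim_equal_isInvalidPeriod := by
  intro s period _hdom hpre
  unfold Spec_isInvalidPeriod isInvalidPeriod isInvalidPeriod_alt
  simp only []
  have hlen : PySem.Str.len s = ((s.toList.length : Nat) : Int) := by simp
  by_cases hmod : PySem.Int.mod (PySem.Str.len s) period = 0
  · rw [if_neg (not_not_intro hmod), if_neg (not_not_intro hmod)]
    rw [hlen] at hmod ⊢
    have hdvd : period ∣ ((s.toList.length : Nat) : Int) :=
      (PySem.Int.mod_eq_zero_iff_dvd _ _).mp hmod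
    rcases hpre with hpos | ⟨hneg, hnil, hnen⟩
    · -- positive period
      have hpcast : period = ((period.toNat : Nat) : Int) := by omega
      rw [hpcast] at hdvd ⊢
      exact main_pos s period.toNat (by omega)
        (Int.natCast_dvd_natCast.mp hdvd)
    · -- negative period inside Pre_: A's loop fails at its first block, B compares s with ''
      have hn0 : 0 < s.toList.length := List.length_pos_of_ne_nil hnil
      have hkcast : period = -(((-period).toNat : Nat) : Int) := by omega
      have hk0 : 0 < (-period).toNat := by omega
      have hkle : -period ≤ ((s.toList.length : Nat) : Int) := by
        have habs : |period| ∣ ((s.toList.length : Nat) : Int) := (abs_dvd _ _).mpr hdvd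
        have hle := Int.le_of_dvd (by exact_mod_cast hn0) habs
        rw [abs_of_neg hneg] at hle
        exact hle
      have hklt : (-period).toNat < s.toList.length := by omega
      have hbitlen : (PySem.Str.slice s none (some period)).toList.length
          = s.toList.length - (-period).toNat := by
        rw [hkcast]
        simp only [PySem.Str.toList_slice, PySem.Chars.slice_eq_listSlice]
        rw [PySem.List.slice_to_neg_natCast _ _ hk0]
        simp only [List.length_take]
        omega
      have hslicelen : (PySem.Str.slice s (some period) (some (period + period))).toList.length
          = 0 := by
        simp only [PySem.Str.toList_slice, PySem.Chars.slice_eq_listSlice]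
        rw [hkcast]
        rw [show (-(((-period).toNat : Nat) : Int)) + (-(((-period).toNat : Nat) : Int))
            = -(((((-period).toNat + (-period).toNat : Nat)) : Int)) by push_cast; ring]
        rw [PySem.List.length_slice]
        rw [PySem.List.clampIdx_neg_natCast _ _ hk0,
          PySem.List.clampIdx_neg_natCast _ _ (by omega)]
        omega
      have hnebit : PySem.Str.slice s (some period) (some (period + period))
          ≠ PySem.Str.slice s none (some period) := by
        intro hcon
        have := congrArg (fun t => t.toList.length) hcon
        simp only at this
        omega
      rw [isInvalidPeriodLoop, if_pos (by omega), if_pos hnebit]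
      -- B: len(s) // period < 0, so the candidate is '' and s ≠ ''
      have hfd := PySem.Int.floordiv_mul_add_mod ((s.toList.length : Nat) : Int) period
      rw [hmod, add_zero] at hfd
      have hfneg : PySem.Int.floordiv ((s.toList.length : Nat) : Int) period < 0 := by
        by_contra hcon
        rw [not_lt] at hcon
        nlinarith [hfd, hn0, hneg,
          Int.natCast_pos.mpr hn0]
      have hrep : PySem.List.pyRepeat (PySem.Str.slice s none (some period)).toList
          (PySem.Int.floordiv ((s.toList.length : Nat) : Int) period) = [] := by
        simp only [PySem.List.pyRepeat, Int.toNat_of_nonpos (le_of_lt hfneg),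
          List.replicate_zero, List.flatten_nil]
      rw [hrep]
      symm
      rw [Bool.beq_eq_decide_eq, decide_eq_false_iff_not]
      intro hcon
      apply hnil
      rw [hcon]
      exact String.toList_ofList
  · rw [if_pos hmod, if_pos hmod]
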